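-- pv_equiv track=rewrite | github.com/SimonOuellette35/ARC_gym | ARC_gym/grid_sampling/object_grid_generation.py | _is_horizontally_symmetric
-- ===== SOURCE A (Python) =====
-- def _is_horizontally_symmetric(pixels):
--     """True iff the set of (r,c) is symmetric about some vertical axis (min_c+max_c - c)."""
--     if not pixels:
--         return True
--     cols = [c for (_, c) in pixels]
--     min_c, max_c = min(cols), max(cols)
--     center_double = min_c + max_c  # mirror of c is center_double - c
--     for (r, c) in pixels:
--         mirror_c = center_double - c
--         if (r, mirror_c) not in pixels:
--             return False
--     return True
-- ===== SOURCE B (Python) =====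
-- def _is_horizontally_symmetric(pixels):
--     """True iff the set of (r,c) is symmetric about some vertical axis (min_c+max_c - c)."""
--     if not pixels:
--         return True
--     cols = [c for (_, c) in pixels]
--     center = min(cols) + max(cols)
--     rows = {}
--     for (r, c) in pixels:
--         rows.setdefault(r, []).append(c)
--     for cs in rows.values():
--         s = sorted(set(cs))
--         n = len(s)
--         for i in range(n):
--             if s[i] + s[n - 1 - i] != center:
--                 return False
--     return True
-- ===== Notes on version B (the rewrite author's own statement) =====
-- stated objective: alternative
-- what changed: Replaces A's per-pixel mirrored-membership scan with a group-by-row pass, sorting each row's distinct columns and checking the paired-index palindrome condition s[i]+s[n-1-i]==center, so no mirrored point is ever looked up in the input.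
import Mathlib
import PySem

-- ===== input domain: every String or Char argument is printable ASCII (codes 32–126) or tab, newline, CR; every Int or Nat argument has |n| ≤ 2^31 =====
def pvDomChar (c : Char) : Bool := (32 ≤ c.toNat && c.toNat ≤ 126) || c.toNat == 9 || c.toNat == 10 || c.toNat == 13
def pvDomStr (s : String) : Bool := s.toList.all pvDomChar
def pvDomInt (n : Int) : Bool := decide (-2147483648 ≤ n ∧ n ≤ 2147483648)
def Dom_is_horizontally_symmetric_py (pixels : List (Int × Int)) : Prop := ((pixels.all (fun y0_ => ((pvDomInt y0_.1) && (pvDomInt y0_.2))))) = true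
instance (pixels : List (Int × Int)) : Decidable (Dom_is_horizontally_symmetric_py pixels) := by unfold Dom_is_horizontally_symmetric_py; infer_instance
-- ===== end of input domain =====

-- B groups the columns by row, sorts each row's distinct columns and checks the paired-index
-- palindrome s[i]+s[n-1-i] = center, instead of A's per-pixel mirrored-membership scan.
-- ===== PORT A =====
-- the 'for (r, c) in pixels' loop with early 'return False'
def pvALoop (all : List (Int × Int)) (cd : Int) : List (Int × Int) → Bool
  | [] => true
  | (r, c) :: rest => if all.contains (r, cd - c) then pvALoop all cd rest else false

def is_horizontally_symmetric_py (pixels : List (Int × Int)) : Bool :=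
  match pixels with
  | [] => true
  | _ :: _ =>
    let cols := pixels.map (fun p => p.2)
    let min_c := (PySem.List.min? cols (fun x => x)).getD 0   -- cols nonempty, so min?/max? are some
    let max_c := (PySem.List.max? cols (fun x => x)).getD 0
    let center_double := min_c + max_c
    pvALoop pixels center_double pixels

-- ===== PORT B =====
def is_horizontally_symmetric_py_alt (pixels : List (Int × Int)) : Bool :=
  match pixels with
  | [] => true
  | _ :: _ =>
    let cols := pixels.map (fun p => p.2)
    let center := (PySem.List.min? cols (fun x => x)).getD 0 + (PySem.List.max? cols (fun x => x)).getD 0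
    -- rows.setdefault(r, []).append(c)
    let rows := pixels.foldl (fun d p => d.modify p.1 ([] : List Int) (· ++ [p.2])) PySem.Dict.empty
    -- for cs in rows.values(): s = sorted(set(cs)); the index loop with early 'return False'
    rows.values.all (fun cs =>
      let s := PySem.List.sorted (PySem.Set.ofList cs) (fun x => x) false
      (PySem.List.pyRange 0 (s.length : Int) 1).all (fun i =>
        decide (PySem.List.pyGetD s i 0 + PySem.List.pyGetD s ((s.length : Int) - 1 - i) 0 = center)))

-- ===== PRECONDITION & SPEC =====
def Spec_is_horizontally_symmetric_py (pixels : List (Int × Int)) (out : Bool) : Prop := out = is_horizontally_symmetric_py_alt pixels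
instance (pixels : List (Int × Int)) (out : Bool) : Decidable (Spec_is_horizontally_symmetric_py pixels out) := by unfold Spec_is_horizontally_symmetric_py; infer_instance

-- ===== CLAIM (what is proved, stated in full; the proofs are below) =====
def Claim_equal_is_horizontally_symmetric_py : Prop := ∀ (pixels : List (Int × Int)), Dom_is_horizontally_symmetric_py pixels → Spec_is_horizontally_symmetric_py pixels (is_horizontally_symmetric_py pixels)

-- ===== LEMMAS AND PROOFS =====

-- A's loop is the 'all mirrored points present' test.
lemma pvALoop_eq_all (all : List (Int × Int)) (cd : Int) (l : List (Int × Int)) :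
    pvALoop all cd l = l.all (fun p => all.contains (p.1, cd - p.2)) := by
  induction l with
  | nil => rfl
  | cons p rest ih =>
    obtain ⟨r, c⟩ := p
    simp [pvALoop, ih]

-- (r, x) ∈ pixels iff x is among row r's collected columns.
lemma pv_mem_cols_iff (pixels : List (Int × Int)) (r x : Int) :
    x ∈ (pixels.filter (fun p => p.1 == r)).map (fun p => p.2) ↔ (r, x) ∈ pixels := by
  simp only [List.mem_map, List.mem_filter, beq_iff_eq]
  constructor
  · rintro ⟨p, ⟨hp, rfl⟩, rfl⟩; exact hp
  · intro h; exact ⟨(r, x), ⟨h, rfl⟩, rfl⟩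

-- B's dict pass: values = per-row column lists, keyed by first occurrence of each row index.
lemma pv_rows_values (pixels : List (Int × Int)) :
    (pixels.foldl (fun d p => d.modify p.1 ([] : List Int) (· ++ [p.2])) PySem.Dict.empty).values
      = (PySem.Set.ofList (pixels.map (fun p => p.1))).map
          (fun r => (pixels.filter (fun p => p.1 == r)).map (fun p => p.2)) := by
  have hnd := PySem.Dict.nodup_keys_foldl_modify_key pixels (fun p => p.1) ([] : List Int)
      (fun _ p v => v ++ [p.2]) PySem.Dict.empty PySem.Dict.nodup_keys_empty
  rw [PySem.Dict.values_eq_map_keys _ hnd []]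
  rw [PySem.Dict.keys_foldl_modify_key pixels (fun p => p.1) ([] : List Int) (fun _ p v => v ++ [p.2])]
  simp only [PySem.Dict.keys_empty, PySem.Set.update_nil_left]
  apply List.map_congr_left
  intro r _
  rw [PySem.Dict.getD_foldl_modify_append, PySem.Dict.getD_empty, List.nil_append]

-- Core per-row fact: the sorted distinct columns satisfy the paired-index palindrome
-- identity iff the column list is closed under c ↦ cd - c.
lemma pv_palindrome_iff_closed (L : List Int) (cd : Int) :
    (∀ i : Nat, i < (PySem.List.sorted (PySem.Set.ofList L) (fun x => x) false).length →
        (PySem.List.sorted (PySem.Set.ofList L) (fun x => x) false).getD i 0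
          + (PySem.List.sorted (PySem.Set.ofList L) (fun x => x) false).getD
              ((PySem.List.sorted (PySem.Set.ofList L) (fun x => x) false).length - 1 - i) 0 = cd)
    ↔ (∀ c ∈ L, cd - c ∈ L) := by
  set s := PySem.List.sorted (PySem.Set.ofList L) (fun x => x) false with hs
  have hmem : ∀ x : Int, x ∈ s ↔ x ∈ L := by
    intro x
    rw [hs, PySem.List.mem_sorted, PySem.Set.mem_ofList]
  have hlt : s.Pairwise (· < ·) := PySem.List.sorted_ofList_pairwise_lt L
  constructor
  · intro h c hc
    obtain ⟨i, hi, rfl⟩ := List.mem_iff_getElem.mp ((hmem c).mpr hc)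
    have hj : s.length - 1 - i < s.length := by omega
    have := h i hi
    rw [List.getD_eq_getElem s 0 hi, List.getD_eq_getElem s 0 hj] at this
    have : s[s.length - 1 - i] = cd - s[i] := by omega
    exact (hmem _).mp (this ▸ List.getElem_mem hj)
  · intro hcl
    have hcls : ∀ x ∈ s, cd - x ∈ s := fun x hx => (hmem _).mpr (hcl x ((hmem x).mp hx))
    set t := (s.reverse).map (fun x => cd - x) with ht
    have htlt : t.Pairwise (· < ·) := by
      apply List.Pairwise.map (fun x => cd - x)
        (fun a b (hab : b < a) => show cd - a < cd - b by omega)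
      exact (List.pairwise_reverse).mpr hlt
    have htnd : t.Nodup := htlt.imp ne_of_lt
    have hsnd : s.Nodup := hlt.imp ne_of_lt
    have hts : t.Perm s := by
      rw [List.perm_ext_iff_of_nodup htnd hsnd]
      intro a
      constructor
      · intro ha
        obtain ⟨y, hy, rfl⟩ := List.mem_map.mp ha
        exact hcls y (List.mem_reverse.mp hy)
      · intro ha
        refine List.mem_map.mpr ⟨cd - a, List.mem_reverse.mpr (hcls a ha), by omega⟩
    have hst : s = t := by
      rw [hs]
      exact PySem.List.sorted_eq_of_perm_of_pairwise_lt _ _ _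
        (hts.trans (hs ▸ PySem.List.sorted_perm (PySem.Set.ofList L) (fun x => x) false)) htlt
    intro i hi
    have hj : s.length - 1 - i < s.length := by omega
    rw [List.getD_eq_getElem s 0 hi, List.getD_eq_getElem s 0 hj]
    have hlen : t.length = s.length := by simp [ht]
    rw [List.getElem_of_eq hst hi]
    have : t[i]'(by omega) = cd - s[s.length - 1 - i] := by
      simp [ht, List.getElem_reverse]
    omega

-- B's index loop over range(len(s)) is the Nat-indexed palindrome condition.
lemma pv_inner_all (s : List Int) (cd : Int) :
    ((PySem.List.pyRange 0 (s.length : Int) 1).all (fun i =>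
       decide (PySem.List.pyGetD s i 0 + PySem.List.pyGetD s ((s.length : Int) - 1 - i) 0 = cd))) = true
    ↔ ∀ i : Nat, i < s.length → s.getD i 0 + s.getD (s.length - 1 - i) 0 = cd := by
  rw [List.all_eq_true]
  simp only [PySem.List.mem_pyRange_one, decide_eq_true_eq]
  constructor
  · intro h i hi
    have := h (i : Int) ⟨by omega, by exact_mod_cast hi⟩
    rw [PySem.List.pyGetD_natCast] at this
    have hj : ((s.length : Int) - 1 - (i : Int)) = ((s.length - 1 - i : Nat) : Int) := by omega
    rw [hj, PySem.List.pyGetD_natCast] at this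
    exact this
  · intro h i ⟨h0, hn⟩
    have hi : i.toNat < s.length := by omega
    have := h i.toNat hi
    have hcast : (i.toNat : Int) = i := by omega
    have hj : ((s.length : Int) - 1 - i) = ((s.length - 1 - i.toNat : Nat) : Int) := by omega
    rw [← hcast] at hj ⊢
    rw [hj, PySem.List.pyGetD_natCast, PySem.List.pyGetD_natCast]
    exact this

-- The two whole-program conditions agree for any fixed center.
lemma pv_main (P : List (Int × Int)) (cd : Int) :
    pvALoop P cd P =
      (P.foldl (fun d p => d.modify p.1 ([] : List Int) (· ++ [p.2])) PySem.Dict.empty).values.all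
        (fun cs =>
          let s := PySem.List.sorted (PySem.Set.ofList cs) (fun x => x) false
          (PySem.List.pyRange 0 (s.length : Int) 1).all (fun i =>
            decide (PySem.List.pyGetD s i 0 + PySem.List.pyGetD s ((s.length : Int) - 1 - i) 0 = cd))) := by
  rw [pvALoop_eq_all, pv_rows_values, Bool.eq_iff_iff, List.all_eq_true, List.all_eq_true]
  constructor
  · intro h cs hcs
    obtain ⟨r, hr, rfl⟩ := List.mem_map.mp hcs
    show _ = true
    rw [pv_inner_all, pv_palindrome_iff_closed]
    intro c hc
    rw [pv_mem_cols_iff] at hc ⊢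
    have := h (r, c) hc
    simpa [List.contains_iff_mem] using this
  · intro h p hp
    have hr : p.1 ∈ PySem.Set.ofList (P.map (fun p => p.1)) :=
      (PySem.Set.mem_ofList _ _).mpr (List.mem_map.mpr ⟨p, hp, rfl⟩)
    have hmm := h _ (List.mem_map.mpr ⟨p.1, hr, rfl⟩)
    dsimp only at hmm
    rw [pv_inner_all, pv_palindrome_iff_closed] at hmm
    have hc : p.2 ∈ (P.filter (fun q => q.1 == p.1)).map (fun q => q.2) :=
      (pv_mem_cols_iff P p.1 p.2).mpr hp
    have hm2 := hmm p.2 hc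
    rw [pv_mem_cols_iff] at hm2
    simpa [List.contains_iff_mem] using hm2

-- ===== VERDICT (by name: the statement is the Claim_ definition above) =====
theorem is_horizontally_symmetric_py_spec : Claim_equal_is_horizontally_symmetric_py := by
  intro pixels _
  unfold Spec_is_horizontally_symmetric_py is_horizontally_symmetric_py is_horizontally_symmetric_py_alt
  match pixels with
  | [] => rfl
  | q :: rest => exact pv_main (q :: rest) _
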